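-- pv_equiv track=rewrite | github.com/JavierGandaraLaza/DA-2526 | capitulo_2/interludio/scripts/dia_00_cod_00.py | opciones
-- ===== SOURCE A (Python) =====
-- def opciones(n, lista=[]):
--     if len(lista) == n:
--         yield lista
--     else:
--         for i in range(n):
--             if (i) not in lista:
--                 new_lista = list(lista)
--                 new_lista.append((i))
--                 yield from opciones(n, new_lista)
-- ===== SOURCE B (Python) =====
-- from itertools import permutations
--
-- def opciones(n, lista=[]):
--     # closed-form: the backtracking tree is exactly the r-permutations of the
--     # ascending "remaining" values, each prefixed by lista
--     r = n - len(lista)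
--     if r < 0:
--         return
--     remaining = [i for i in range(n) if i not in lista]
--     for p in permutations(remaining, r):
--         yield lista + list(p)
-- ===== Notes on version B (the rewrite author's own statement) =====
-- stated objective: idiomatic
-- what changed: Replaced the recursive backtracking search (scan range(n) with a membership test at every node) by a closed form: compute the remaining values once and emit lista + p for each r-permutation produced by itertools.permutations(remaining, n - len(lista)), which yields the same lexicographic order.
import Mathlib
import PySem

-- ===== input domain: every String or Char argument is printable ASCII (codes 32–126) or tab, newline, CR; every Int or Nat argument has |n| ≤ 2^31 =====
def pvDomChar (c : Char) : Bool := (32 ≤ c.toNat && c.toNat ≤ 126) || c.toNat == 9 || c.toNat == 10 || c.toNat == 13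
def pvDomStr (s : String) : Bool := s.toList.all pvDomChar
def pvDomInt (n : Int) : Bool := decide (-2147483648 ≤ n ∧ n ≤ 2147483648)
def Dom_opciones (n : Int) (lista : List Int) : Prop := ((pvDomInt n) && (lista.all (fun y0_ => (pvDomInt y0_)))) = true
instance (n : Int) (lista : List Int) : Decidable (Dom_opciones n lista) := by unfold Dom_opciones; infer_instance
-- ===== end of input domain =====

-- B replaces A's recursive backtracking by a closed form: prefix ++ each r-permutation
-- (itertools.permutations) of the ascending remaining values; objective: idiomatic.

-- ===== PORT A =====
-- termination lemmas for port A (cited by decreasing_by)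
theorem pvFilter_append_eq (n : Int) (lista : List Int) (i : Int) :
    (PySem.List.pyRange 0 n 1).filter (fun j => !((lista ++ [i]).contains j))
    = ((PySem.List.pyRange 0 n 1).filter (fun j => !(lista.contains j))).filter (fun j => j != i) := by
  rw [List.filter_filter]
  apply List.filter_congr
  intro j _
  by_cases hj : j = i <;> by_cases hc : lista.contains j <;>
    simp_all [List.contains_eq_mem, List.mem_append]

theorem pvMeasure_dec (n : Int) (lista : List Int) (i : Int)
    (hi : i ∈ PySem.List.pyRange 0 n 1) (hc : ¬ lista.contains i = true) :
    ((PySem.List.pyRange 0 n 1).filter (fun j => !((lista ++ [i]).contains j))).length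
    < ((PySem.List.pyRange 0 n 1).filter (fun j => !(lista.contains j))).length := by
  rw [pvFilter_append_eq]
  exact List.length_filter_lt_length_iff_exists.mpr
    ⟨i, by simp [List.mem_filter, hi]; simpa [List.contains_eq_mem] using hc, by simp⟩

def opciones (n : Int) (lista : List Int) : List (List Int) :=
  if (lista.length : Int) = n then [lista]
  else
    ((PySem.List.pyRange 0 n 1).attach.map (fun i =>
      if h : lista.contains i.1 then []
      else opciones n (lista ++ [i.1]))).flatten
termination_by ((PySem.List.pyRange 0 n 1).filter (fun j => !(lista.contains j))).length
decreasing_by exact pvMeasure_dec n lista i.1 i.2 h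

-- ===== PORT B =====
-- Source B's itertools.permutations(remaining, r) is PySem.List.permutations remaining r
def opciones_alt (n : Int) (lista : List Int) : List (List Int) :=
  let r : Int := n - lista.length
  if r < 0 then []
  else
    (PySem.List.permutations
      ((PySem.List.pyRange 0 n 1).filter (fun i => !(lista.contains i))) r.toNat).map
      (fun p => lista ++ p)

-- ===== PRECONDITION & SPEC =====
def Spec_opciones (n : Int) (lista : List Int) (out : List (List Int)) : Prop := out = opciones_alt n lista
instance (n : Int) (lista : List Int) (out : List (List Int)) : Decidable (Spec_opciones n lista out) := by unfold Spec_opciones; infer_instance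

-- ===== CLAIM (what is proved, stated in full; the proofs are below) =====
def Claim_equal_opciones : Prop := ∀ (n : Int) (lista : List Int), Dom_opciones n lista → Spec_opciones n lista (opciones n lista)

-- ===== LEMMAS AND PROOFS =====
theorem pvPerms_succ (xs : List Int) (r : Nat) : PySem.List.permutations xs (r+1) =
    (List.range xs.length).flatMap (fun i =>
      (xs[i]?.map (fun x => (PySem.List.permutations (xs.eraseIdx i) r).map (fun p => x :: p))).getD []) := by
  rw [PySem.List.permutations]
  congr 1; funext i; cases xs[i]? <;> rfl

theorem pvFlatMap_range_eraseIdx {β : Type} :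
    ∀ (xs : List Int), xs.Nodup → ∀ (G : Int → List Int → List β),
    (List.range xs.length).flatMap (fun i => (xs[i]?.map (fun y => G y (xs.eraseIdx i))).getD [])
    = xs.flatMap (fun y => G y (xs.filter (fun z => z != y)))
  | [], _, G => by simp
  | x :: xs, h, G => by
    have hx : x ∉ xs := (List.nodup_cons.mp h).1
    have hnd : xs.Nodup := (List.nodup_cons.mp h).2
    have ih := pvFlatMap_range_eraseIdx xs hnd (fun y l => G y (x :: l))
    simp only at ih
    simp only [List.length_cons, List.range_succ_eq_map, List.flatMap_cons, List.flatMap_map,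
      List.getElem?_cons_zero, List.getElem?_cons_succ, List.eraseIdx_cons_zero,
      List.eraseIdx_cons_succ, Option.map_some, Option.getD_some]
    rw [ih]
    congr 1
    · have : xs.filter (fun z => z != x) = xs :=
        List.filter_eq_self.mpr (fun a ha => by simp [ne_of_mem_of_not_mem ha hx])
      simp [this]
    · apply List.flatMap_congr
      intro y hy
      have hxy : (x != y) = true := by
        simp [ne_of_mem_of_not_mem hy hx |>.symm]
      simp [hxy]

theorem pvFlatMap_ite_filter {β : Type} (p : Int → Bool) (f : Int → List β) :
    ∀ (l : List Int),
    l.flatMap (fun i => if p i then [] else f i) = (l.filter (fun i => !(p i))).flatMap f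
  | [] => by simp
  | x :: l => by
    by_cases hx : p x <;>
      simp [List.flatMap_cons, hx, pvFlatMap_ite_filter p f l]

theorem pvMain (n : Int) : ∀ (m : Nat) (lista : List Int),
    ((PySem.List.pyRange 0 n 1).filter (fun j => !(lista.contains j))).length < m →
    opciones n lista = opciones_alt n lista := by
  intro m
  induction m with
  | zero => intro lista h; exact absurd h (Nat.not_lt_zero _)
  | succ m ih =>
    intro lista hm
    rw [opciones]
    by_cases hlen : (lista.length : Int) = n
    · simp only [hlen, opciones_alt]
      have : n - (lista.length : Int) = 0 := by omega
      simp [← hlen]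
    · rw [if_neg hlen]
      by_cases hlt : n < (lista.length : Int)
      · -- length > n : every branch is empty on both sides
        have hB : opciones_alt n lista = [] := by
          unfold opciones_alt
          rw [if_pos (by omega)]
        rw [hB, List.flatten_eq_nil_iff]
        intro l hl
        obtain ⟨i, _, rfl⟩ := List.mem_map.mp hl
        by_cases hc : lista.contains i.1
        · rw [dif_pos hc]
        · rw [dif_neg hc]
          have hdec := pvMeasure_dec n lista i.1 i.2 hc
          rw [ih (lista ++ [i.1]) (by omega)]
          unfold opciones_alt
          rw [if_pos (by simp; omega)]
      · -- length < n : peel one choice from the permutations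
        have hlen' : (lista.length : Int) < n := by omega
        -- rewrite each recursive call via ih
        have hcall : ∀ i ∈ (PySem.List.pyRange 0 n 1).attach,
            (if h : lista.contains i.1 then [] else opciones n (lista ++ [i.1]))
            = (if lista.contains i.1 then [] else opciones_alt n (lista ++ [i.1])) := by
          intro i _
          by_cases hc : lista.contains i.1
          · rw [dif_pos hc, if_pos hc]
          · rw [dif_neg hc, if_neg hc]
            exact ih (lista ++ [i.1]) (by have := pvMeasure_dec n lista i.1 i.2 hc; omega)
        rw [List.map_congr_left hcall]
        rw [List.attach_map_val (l := PySem.List.pyRange 0 n 1)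
          (f := fun v => if lista.contains v = true then [] else opciones_alt n (lista ++ [v]))]
        rw [← List.flatMap_def, pvFlatMap_ite_filter]
        -- now both sides are over rem := filtered range
        set rem := (PySem.List.pyRange 0 n 1).filter (fun j => !(lista.contains j)) with hrem
        have hnd : rem.Nodup := (PySem.List.nodup_pyRange_one 0 n).filter _
        have hr : (n - (lista.length : Int)).toNat
            = (n - ((lista.length : Int) + 1)).toNat + 1 := by omega
        unfold opciones_alt
        rw [if_neg (by omega), ← hrem, hr, pvPerms_succ,
          pvFlatMap_range_eraseIdx rem hnd
            (fun y l => (PySem.List.permutations l (n - ((lista.length : Int) + 1)).toNat).map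
              (fun p => y :: p)),
          List.map_flatMap]
        apply List.flatMap_congr
        intro i hi
        simp only []
        rw [if_neg (by simp; omega)]
        rw [pvFilter_append_eq, ← hrem]
        have harg : (n - ((lista ++ [i]).length : Int)).toNat
            = (n - ((lista.length : Int) + 1)).toNat := by
          simp
        rw [harg, List.map_map]
        apply List.map_congr_left
        intro p _
        simp

-- ===== VERDICT (by name: the statement is the Claim_ definition above) =====
theorem opciones_spec : Claim_equal_opciones := by
  intro n lista _
  unfold Spec_opciones
  exact pvMain n _ lista (Nat.lt_succ_self _)
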